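-- pv_equiv track=rewrite | github.com/swan07222/Trading-graph | ui/background_tasks.py | sanitize_watch_list
-- ===== SOURCE A (Python) =====
-- def validate_stock_code(code: str) -> bool:
--     """Validate that a stock code is a valid 6-digit Chinese stock code."""
--     if not code:
--         return False
--     digits = "".join(c for c in str(code).strip() if c.isdigit())
--     if len(digits) != 6:
--         return False
--     valid_prefixes = (
--         "000",
--         "001",
--         "002",
--         "003",
--         "300",
--         "301",
--         "600",
--         "601",
--         "603",
--         "605",
--         "688",
--         "83",
--         "87",
--         "43",
--     )
--     return digits.startswith(valid_prefixes)
--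
-- def normalize_stock_code(text: str) -> str:
--     """Normalize stock code: strip prefixes/suffixes, keep digits, zero-pad."""
--     if not text:
--         return ""
--     normalized = str(text).strip()
--     for prefix in ("sh", "sz", "SH", "SZ", "bj", "BJ"):
--         if normalized.startswith(prefix):
--             normalized = normalized[len(prefix) :]
--     for suffix in (".SS", ".SZ", ".BJ"):
--         if normalized.endswith(suffix):
--             normalized = normalized[: -len(suffix)]
--     normalized = "".join(c for c in normalized if c.isdigit())
--     return normalized.zfill(6) if normalized else ""
--
-- def sanitize_watch_list(
--     codes: list[str] | tuple[str, ...] | str | None,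
--     max_size: int = 50,
-- ) -> list[str]:
--     """Normalize, validate, de-duplicate, and cap watchlist symbols."""
--     if not codes:
--         return []
--     if isinstance(codes, str):
--         iterable = [codes]
--     else:
--         iterable = list(codes)
--
--     cap = max(1, int(max_size or 50))
--     out: list[str] = []
--     seen: set[str] = set()
--
--     for raw in iterable:
--         code = normalize_stock_code(str(raw or ""))
--         if not code or not validate_stock_code(code):
--             continue
--         if code in seen:
--             continue
--         seen.add(code)
--         out.append(code)
--         if len(out) >= cap:
--             break
--
--     return out
-- ===== SOURCE B (Python) =====
-- def validate_stock_code(code: str) -> bool: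
--     """Validate that a stock code is a valid 6-digit Chinese stock code."""
--     if not code:
--         return False
--     digits = "".join(c for c in str(code).strip() if c.isdigit())
--     if len(digits) != 6:
--         return False
--     valid_prefixes = (
--         "000", "001", "002", "003", "300", "301", "600", "601",
--         "603", "605", "688", "83", "87", "43",
--     )
--     return digits.startswith(valid_prefixes)
--
--
-- def normalize_stock_code(text: str) -> str:
--     """Normalize stock code: strip prefixes/suffixes, keep digits, zero-pad."""
--     if not text:
--         return ""
--     normalized = str(text).strip()
--     for prefix in ("sh", "sz", "SH", "SZ", "bj", "BJ"):
--         if normalized.startswith(prefix):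
--             normalized = normalized[len(prefix):]
--     for suffix in (".SS", ".SZ", ".BJ"):
--         if normalized.endswith(suffix):
--             normalized = normalized[: -len(suffix)]
--     normalized = "".join(c for c in normalized if c.isdigit())
--     return normalized.zfill(6) if normalized else ""
--
--
-- def sanitize_watch_list(codes, max_size=50):
--     """Staged pipeline: normalize all, filter valid, dedupe in order, cap."""
--     if not codes:
--         return []
--     iterable = [codes] if isinstance(codes, str) else list(codes)
--     cap = max(1, int(max_size or 50))
--     normalized = [normalize_stock_code(str(raw or "")) for raw in iterable]
--     valid = [c for c in normalized if c and validate_stock_code(c)]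
--     unique = list(dict.fromkeys(valid))
--     return unique[:cap]
-- ===== Notes on version B (the rewrite author's own statement) =====
-- stated objective: simpler
-- what changed: Replaced the fused early-breaking loop with mutable seen-set state by a staged pipeline: map-normalize, filter-validate, ordered dedup via dict.fromkeys, then a final [:cap] slice.
import Mathlib
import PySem

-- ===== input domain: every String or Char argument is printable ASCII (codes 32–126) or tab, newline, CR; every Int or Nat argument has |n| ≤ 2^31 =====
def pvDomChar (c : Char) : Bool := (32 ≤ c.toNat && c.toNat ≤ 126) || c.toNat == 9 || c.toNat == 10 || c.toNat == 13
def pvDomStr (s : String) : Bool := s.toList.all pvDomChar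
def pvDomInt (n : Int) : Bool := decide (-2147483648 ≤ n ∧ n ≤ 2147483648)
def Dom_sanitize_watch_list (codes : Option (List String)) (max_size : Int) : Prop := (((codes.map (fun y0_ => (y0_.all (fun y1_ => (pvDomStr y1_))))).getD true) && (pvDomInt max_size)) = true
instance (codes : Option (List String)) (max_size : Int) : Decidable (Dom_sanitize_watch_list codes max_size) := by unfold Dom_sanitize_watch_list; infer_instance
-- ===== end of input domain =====

-- B replaces A's fused early-breaking loop (mutable seen-set) by a staged pipeline
-- (map-normalize, filter-validate, ordered dedup, final slice); objective: simpler.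
-- Note: in Lean, 'codes' is Option (List String); Python's lone-str / tuple coercions
-- are outside this type and not modelled.

-- ===== PORT A =====
-- shared module helper: validate_stock_code (both A and B call it, as in the Python module)
def validate_stock_code (code : String) : Bool :=
  if code == "" then false
  else
    -- "".join(c for c in str(code).strip() if c.isdigit()) over code points (exact on ASCII domain)
    let digits : List Char := (PySem.Chars.strip code.toList).filter PySem.Chars.isdigit
    if digits.length ≠ 6 then false
    else
      ["000", "001", "002", "003", "300", "301", "600", "601",
       "603", "605", "688", "83", "87", "43"].any
        (fun p => p.toList.isPrefixOf digits)   -- digits.startswith(tuple)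

-- shared module helper: normalize_stock_code
def normalize_stock_code (text : String) : String :=
  if text == "" then ""
  else
    let n0 : List Char := PySem.Chars.strip text.toList
    let n1 : List Char :=
      ["sh", "sz", "SH", "SZ", "bj", "BJ"].foldl
        (fun n p => if p.toList.isPrefixOf n then n.drop p.toList.length else n) n0
    let n2 : List Char :=
      [".SS", ".SZ", ".BJ"].foldl
        (fun n s => if s.toList.isSuffixOf n then n.take (n.length - s.toList.length) else n) n1
        -- normalized[:-len(suffix)]: suffix present, so exactly take (len - |suffix|)
    let digits : List Char := n2.filter PySem.Chars.isdigit
    if digits = [] then "" else String.ofList (PySem.Chars.zfill digits 6)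

-- A's for-loop over the iterable with mutable out/seen and the early break
def sanitizeLoopA (cap : Int) : List String → List String → PySem.Set String → List String
  | [], out, _ => out
  | raw :: rest, out, seen =>
    let code := normalize_stock_code (if raw == "" then "" else raw)  -- str(raw or "")
    if (code == "") || !validate_stock_code code then sanitizeLoopA cap rest out seen
    else if PySem.Set.contains seen code then sanitizeLoopA cap rest out seen
    else
      let out' := out ++ [code]
      if (out'.length : Int) ≥ cap then out'
      else sanitizeLoopA cap rest out' (PySem.Set.add seen code)

def sanitize_watch_list (codes : Option (List String)) (max_size : Int) : List String :=
  match codes with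
  | none => []
  | some l =>
    if l = [] then []   -- 'if not codes: return []'
    else
      let cap : Int := max 1 (if max_size = 0 then 50 else max_size)  -- max(1, int(max_size or 50))
      sanitizeLoopA cap l [] PySem.Set.empty

-- ===== PORT B =====
def sanitize_watch_list_alt (codes : Option (List String)) (max_size : Int) : List String :=
  match codes with
  | none => []
  | some l =>
    if l = [] then []
    else
      let cap : Int := max 1 (if max_size = 0 then 50 else max_size)
      let normalized := l.map (fun raw => normalize_stock_code (if raw == "" then "" else raw))
      let valid := normalized.filter (fun c => (!(c == "")) && validate_stock_code c)
      let unique := PySem.List.dedup valid   -- list(dict.fromkeys(valid))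
      PySem.List.slice unique none (some cap)  -- unique[:cap]

-- ===== PRECONDITION & SPEC =====
def Spec_sanitize_watch_list (codes : Option (List String)) (max_size : Int) (out : List String) : Prop := out = sanitize_watch_list_alt codes max_size
instance (codes : Option (List String)) (max_size : Int) (out : List String) : Decidable (Spec_sanitize_watch_list codes max_size out) := by unfold Spec_sanitize_watch_list; infer_instance

-- ===== CLAIM (what is proved, stated in full; the proofs are below) =====
def Claim_equal_sanitize_watch_list : Prop := ∀ (codes : Option (List String)) (max_size : Int), Dom_sanitize_watch_list codes max_size → Spec_sanitize_watch_list codes max_size (sanitize_watch_list codes max_size)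

-- ===== LEMMAS AND PROOFS =====

-- ordered dedup relative to an already-seen set (proof-only helper)
def dedupFrom (seen : PySem.Set String) : List String → List String
  | [] => []
  | x :: xs =>
    if PySem.Set.contains seen x then dedupFrom seen xs
    else x :: dedupFrom (PySem.Set.add seen x) xs

theorem foldl_add_eq_dedupFrom (xs : List String) (s : PySem.Set String) :
    xs.foldl PySem.Set.add s = s ++ dedupFrom s xs := by
  induction xs generalizing s with
  | nil => simp [dedupFrom]
  | cons x xs ih =>
    simp only [List.foldl_cons, dedupFrom]
    by_cases h : PySem.Set.contains s x
    · have hm : x ∈ s := by simpa [PySem.Set.contains] using h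
      rw [ih]
      simp [PySem.Set.add, dedupFrom, hm]
    · have hm : x ∉ s := by simpa [PySem.Set.contains] using h
      rw [ih]
      simp [PySem.Set.add, dedupFrom, hm]

theorem dedup_eq_dedupFrom (xs : List String) :
    PySem.List.dedup xs = dedupFrom PySem.Set.empty xs := by
  have := foldl_add_eq_dedupFrom xs PySem.Set.empty
  simpa [PySem.List.dedup_eq_ofList, PySem.Set.ofList_eq_foldl, PySem.Set.empty] using this

-- the loop with early break equals "dedup the valid tail, then take the remaining budget"
theorem loopA_eq (cap : Int) (l : List String) (out : List String) (seen : PySem.Set String)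
    (hlen : (out.length : Int) < cap) :
    sanitizeLoopA cap l out seen
      = out ++ (dedupFrom seen
          ((l.map (fun raw => normalize_stock_code (if raw == "" then "" else raw))).filter
            (fun c => (!(c == "")) && validate_stock_code c))).take (cap - out.length).toNat := by
  induction l generalizing out seen with
  | nil => simp [sanitizeLoopA, dedupFrom]
  | cons raw rest ih =>
    simp only [sanitizeLoopA, List.map_cons, List.filter_cons]
    set code := normalize_stock_code (if raw == "" then "" else raw) with hcode
    by_cases hbad : ((code == "") || !validate_stock_code code) = true
    · have hp : ((!(code == "")) && validate_stock_code code) = false := by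
        cases h1 : (code == "") <;> cases h2 : validate_stock_code code <;> simp_all
      rw [if_pos hbad, hp]
      simpa using ih out seen hlen
    · have hp : ((!(code == "")) && validate_stock_code code) = true := by
        cases h1 : (code == "") <;> cases h2 : validate_stock_code code <;> simp_all
      rw [if_neg hbad, hp]
      simp only [if_true]
      by_cases hseen : PySem.Set.contains seen code
      · have hm : code ∈ seen := by simpa [PySem.Set.contains] using hseen
        rw [if_pos hseen]
        have : dedupFrom seen (code :: (rest.map (fun raw => normalize_stock_code (if raw == "" then "" else raw))).filter (fun c => (!(c == "")) && validate_stock_code c)) = dedupFrom seen ((rest.map (fun raw => normalize_stock_code (if raw == "" then "" else raw))).filter (fun c => (!(c == "")) && validate_stock_code c)) := by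
          simp [dedupFrom, hm]
        rw [this]
        exact ih out seen hlen
      · have hm : code ∉ seen := by simpa [PySem.Set.contains] using hseen
        rw [if_neg hseen]
        have hded : dedupFrom seen (code :: (rest.map (fun raw => normalize_stock_code (if raw == "" then "" else raw))).filter (fun c => (!(c == "")) && validate_stock_code c)) = code :: dedupFrom (PySem.Set.add seen code) ((rest.map (fun raw => normalize_stock_code (if raw == "" then "" else raw))).filter (fun c => (!(c == "")) && validate_stock_code c)) := by
          simp [dedupFrom, hm]
        rw [hded]
        have htake : (cap - out.length).toNat = (cap - (out ++ [code]).length).toNat + 1 := by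
          simp only [List.length_append, List.length_cons, List.length_nil]
          omega
        by_cases hcap : ((out ++ [code]).length : Int) ≥ cap
        · rw [if_pos hcap]
          have h1 : (cap - out.length).toNat = 1 := by
            simp only [List.length_append, List.length_cons, List.length_nil] at hcap
            omega
          simp [h1]
        · rw [if_neg hcap]
          have hlen' : (((out ++ [code]).length : Nat) : Int) < cap := by omega
          rw [ih (out ++ [code]) (PySem.Set.add seen code) hlen']
          rw [htake]
          simp [List.take_succ_cons]

-- ===== VERDICT (by name: the statement is the Claim_ definition above) =====
theorem sanitize_watch_list_spec : Claim_equal_sanitize_watch_list := by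
  intro codes max_size _hdom
  unfold Spec_sanitize_watch_list sanitize_watch_list sanitize_watch_list_alt
  match codes with
  | none => rfl
  | some l =>
    by_cases hl : l = []
    · simp [hl]
    · simp only [if_neg hl]
      set cap : Int := max 1 (if max_size = 0 then 50 else max_size) with hcap
      have hcap1 : 1 ≤ cap := le_max_left _ _
      rw [loopA_eq cap l [] PySem.Set.empty (by simpa using lt_of_lt_of_le Int.zero_lt_one hcap1)]
      rw [PySem.List.slice_to _ (by omega)]
      rw [dedup_eq_dedupFrom]
      simp
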